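-- pv_equiv track=rewrite | github.com/greenhelix/AlgorithmStudy | 프로그래머스/카카오/카카오정규채용/2021/게시판불량자.py | solution
-- ===== SOURCE A (Python) =====
-- def solution(id_list, report, k):
--     answer = {a: 0 for a in id_list}
--     ban_list = {a: set() for a in id_list}
--
--     for i in report:
--         a, b = map(str, i.split())
--         if b in ban_list:
--             ban_list[b].add(a)
--
--     for i, v in ban_list.items():
--         if len(v) >= k:
--             for j in v:
--                 answer[j] += 1
--
--     return list(answer.values())
-- ===== SOURCE B (Python) =====
-- def solution(id_list, report, k):
--     # Dedup (reporter, reported) pairs once, count distinct reporters per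
--     # reported user, form the banned set, then one pass over the deduped pairs.
--     pairs = []
--     seen = set()
--     for line in report:
--         a, b = line.split()
--         if (a, b) not in seen:
--             seen.add((a, b))
--             pairs.append((a, b))
--     counts = {}
--     for a, b in pairs:
--         if b in id_list:
--             counts[b] = counts.get(b, 0) + 1
--     banned = [b for b in counts if counts[b] >= k]
--     answer = {u: 0 for u in id_list}
--     for a, b in pairs:
--         if b in banned:
--             answer[a] += 1
--     return list(answer.values())
-- ===== Notes on version B (the rewrite author's own statement) =====
-- stated objective: alternative
-- what changed: B replaces A's per-user reporter-set dict with one global dedup of (reporter, reported) pairs, a count dict of distinct reporters per reported user, an explicit banned list, and a single counting pass over the deduped pairs.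
import Mathlib
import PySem

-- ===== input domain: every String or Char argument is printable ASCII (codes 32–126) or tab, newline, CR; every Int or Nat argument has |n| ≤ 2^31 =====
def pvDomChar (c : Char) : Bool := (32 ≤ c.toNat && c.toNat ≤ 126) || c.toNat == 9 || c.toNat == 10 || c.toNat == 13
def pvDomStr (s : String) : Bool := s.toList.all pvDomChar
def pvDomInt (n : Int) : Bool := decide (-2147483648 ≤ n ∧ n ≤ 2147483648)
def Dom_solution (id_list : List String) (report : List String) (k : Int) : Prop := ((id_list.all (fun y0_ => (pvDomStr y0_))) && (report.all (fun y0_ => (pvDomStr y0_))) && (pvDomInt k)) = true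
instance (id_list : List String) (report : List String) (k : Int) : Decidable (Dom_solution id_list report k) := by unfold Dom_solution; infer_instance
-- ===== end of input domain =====

-- B re-decomposes A: one global dedup of (reporter, reported) pairs plus a count
-- dict replaces A's per-user reporter sets; objective: alternative decomposition.

-- ===== PORT A =====
-- first loop body: a, b = map(str, i.split()); if b in ban_list: ban_list[b].add(a)
-- (a line whose split is not exactly two tokens raises ValueError in Python; excluded by Pre_solution)
def solStepA (d : PySem.Dict String (PySem.Set String)) (i : String) :
    PySem.Dict String (PySem.Set String) :=
  match PySem.Str.split₀ i with
  | [a, b] => if d.contains b then d.modify b PySem.Set.empty (fun s => PySem.Set.add s a) else d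
  | _ => d

-- 'for j in v: answer[j] += 1' iterates a Python set (hash order); the result does not depend on
-- that order (commuting increments at distinct keys), so iterating v in insertion order is exact.
-- 'answer[j] += 1' raises KeyError when j is absent; Pre_solution guarantees j is a key.
def solution (id_list : List String) (report : List String) (k : Int) : List Int :=
  let answer : PySem.Dict String Int :=
    id_list.foldl (fun d a => d.insert a 0) PySem.Dict.empty
  let banList : PySem.Dict String (PySem.Set String) :=
    id_list.foldl (fun d a => d.insert a PySem.Set.empty) PySem.Dict.empty
  let banList := report.foldl solStepA banList
  let answer := banList.items.foldl (fun ans iv =>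
      if k ≤ PySem.Set.len iv.2 then
        iv.2.foldl (fun a j => a.modify j 0 (· + 1)) ans
      else ans) answer
  answer.values

-- ===== PORT B =====
-- loop body of B's dedup pass: a, b = line.split(); seen.add((a,b)) / pairs.append
-- (seen + pairs together are exactly a PySem.Set built by add; bad lines raise ValueError, excluded by Pre_solution)
def altStepB (s : PySem.Set (String × String)) (line : String) : PySem.Set (String × String) :=
  match PySem.Str.split₀ line with
  | [a, b] => PySem.Set.add s (a, b)
  | _ => s

def solution_alt (id_list : List String) (report : List String) (k : Int) : List Int :=
  let pairs : PySem.Set (String × String) := report.foldl altStepB PySem.Set.empty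
  let counts : PySem.Dict String Int :=
    pairs.foldl (fun d p => if id_list.contains p.2 then d.insert p.2 (d.getD p.2 0 + 1) else d)
      PySem.Dict.empty
  let banned : List String := (counts.items.filter (fun q => k ≤ q.2)).map (·.1)
  let answer : PySem.Dict String Int :=
    id_list.foldl (fun d u => d.insert u 0) PySem.Dict.empty
  -- 'answer[a] += 1' raises KeyError when a is absent; Pre_solution guarantees a is a key.
  let answer := pairs.foldl (fun ans p =>
      if banned.contains p.2 then ans.modify p.1 0 (· + 1) else ans) answer
  answer.values

-- ===== PRECONDITION & SPEC =====
-- the (reporter, reported) pairs of the well-formed report lines, in order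
def pvPairs (report : List String) : List (String × String) :=
  report.filterMap (fun line =>
    match PySem.Str.split₀ line with | [a, b] => some (a, b) | _ => none)

-- the distinct reporters of user b, in first-report order
def pvReporters (report : List String) (b : String) : List String :=
  PySem.List.dedup (((pvPairs report).filter (fun p => p.2 == b)).map (·.1))

-- Pre_ excludes exactly the inputs where A raises: a report line that does not split into exactly
-- two tokens (ValueError on unpacking), and a reporter of a banned user (a user of id_list with at
-- least k distinct reporters) who is not himself in id_list (KeyError on answer[j] += 1).
def Pre_solution (id_list : List String) (report : List String) (k : Int) : Prop :=
  (∀ line ∈ report, (PySem.Str.split₀ line).length = 2) ∧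
  (∀ p ∈ pvPairs report, p.2 ∈ id_list →
      k ≤ ((pvReporters report p.2).length : Int) → p.1 ∈ id_list)
instance (id_list : List String) (report : List String) (k : Int) :
    Decidable (Pre_solution id_list report k) := by unfold Pre_solution; infer_instance

def pvWitness_solution : List String × List String × Int :=
  (["muzi", "frodo", "apeach"], ["muzi frodo", "apeach frodo", "muzi frodo"], 2)

def Spec_solution (id_list : List String) (report : List String) (k : Int) (out : List Int) : Prop := out = solution_alt id_list report k
instance (id_list : List String) (report : List String) (k : Int) (out : List Int) : Decidable (Spec_solution id_list report k out) := by unfold Spec_solution; infer_instance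

-- ===== CLAIM (what is proved, stated in full; the proofs are below) =====
def Claim_equal_solution : Prop := ∀ (id_list : List String) (report : List String) (k : Int), Dom_solution id_list report k → Pre_solution id_list report k → Spec_solution id_list report k (solution id_list report k)

-- ===== LEMMAS AND PROOFS =====

-- the tokens of a well-formed line, as an optional pair
def pvToPair? (line : String) : Option (String × String) :=
  match PySem.Str.split₀ line with | [a, b] => some (a, b) | _ => none

-- the reporter set of b as A's final ban_list stores it
def pvRep (L : List (String × String)) (b : String) : PySem.Set String :=
  PySem.Set.ofList ((L.filter (fun p => p.2 == b)).map (·.1))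

-- A's first loop, re-expressed on the pair list
def pairStepA (d : PySem.Dict String (PySem.Set String)) (p : String × String) :
    PySem.Dict String (PySem.Set String) :=
  if d.contains p.2 then d.modify p.2 PySem.Set.empty (fun s => PySem.Set.add s p.1) else d

theorem pvPairs_eq (report : List String) : pvPairs report = report.filterMap pvToPair? := by
  unfold pvPairs pvToPair?; rfl

theorem solStepA_eq (d : PySem.Dict String (PySem.Set String)) (i : String) :
    solStepA d i = match pvToPair? i with | some p => pairStepA d p | none => d := by
  unfold solStepA pvToPair? pairStepA
  rcases PySem.Str.split₀ i with _ | ⟨a, _ | ⟨b, _ | ⟨c, t⟩⟩⟩ <;> rfl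

theorem altStepB_eq (s : PySem.Set (String × String)) (line : String) :
    altStepB s line = match pvToPair? line with | some p => PySem.Set.add s p | none => s := by
  unfold altStepB pvToPair?
  rcases PySem.Str.split₀ line with _ | ⟨a, _ | ⟨b, _ | ⟨c, t⟩⟩⟩ <;> rfl

theorem foldA_eq_pairs (report : List String) (d : PySem.Dict String (PySem.Set String)) :
    report.foldl solStepA d = (pvPairs report).foldl pairStepA d := by
  rw [pvPairs_eq]
  induction report generalizing d with
  | nil => rfl
  | cons line rest ih =>
      simp only [List.foldl_cons, List.filterMap_cons, solStepA_eq]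
      cases pvToPair? line with
      | none => exact ih d
      | some p => simpa using ih (pairStepA d p)

theorem foldB_eq_pairs (report : List String) (s : PySem.Set (String × String)) :
    report.foldl altStepB s = (pvPairs report).foldl PySem.Set.add s := by
  rw [pvPairs_eq]
  induction report generalizing s with
  | nil => rfl
  | cons line rest ih =>
      simp only [List.foldl_cons, List.filterMap_cons, altStepB_eq]
      cases pvToPair? line with
      | none => exact ih s
      | some p => simpa using ih (PySem.Set.add s p)

-- keys of a single insert, derived from keys_foldl_insert
theorem keys_insert' {ν : Type} (d : PySem.Dict String ν) (x : String) (v : ν) :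
    (d.insert x v).keys = PySem.Set.add d.keys x := by
  simpa using PySem.Dict.keys_foldl_insert [x] (fun _ _ => v) d

theorem set_update_of_subset (s : PySem.Set String) (xs : List String)
    (h : ∀ x ∈ xs, x ∈ s) : PySem.Set.update s xs = s := by
  induction xs generalizing s with
  | nil => exact PySem.Set.update_nil s
  | cons x xs ih =>
      have hx : PySem.Set.add s x = s := PySem.Set.add_of_mem (h x (by simp))
      have : PySem.Set.update s (x :: xs) = PySem.Set.update (PySem.Set.add s x) xs := rfl
      rw [this, hx]; exact ih s (fun y hy => h y (by simp [hy]))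

theorem set_update_nil_eq_ofList (xs : List String) :
    PySem.Set.update [] xs = PySem.Set.ofList xs := by
  rw [PySem.Set.ofList_eq_foldl]; rfl

-- ---- the initial dicts {a: c for a in id_list} ----

theorem getD_foldl_insert_const {ν : Type} (ids : List String) (d : PySem.Dict String ν)
    (c : ν) (b : String) (h : d.getD b c = c) :
    (ids.foldl (fun d a => d.insert a c) d).getD b c = c := by
  induction ids generalizing d with
  | nil => exact h
  | cons a ids ih =>
      simp only [List.foldl_cons]
      refine ih (d.insert a c) ?_
      by_cases hba : b = a
      · subst hba; exact PySem.Dict.getD_insert_self d b c c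
      · rw [PySem.Dict.getD_insert_of_ne d c c hba]; exact h

theorem keys_foldl_insert_const {ν : Type} (ids : List String) (c : ν) :
    (ids.foldl (fun d a => d.insert a c) PySem.Dict.empty).keys = PySem.Set.ofList ids := by
  have := PySem.Dict.keys_foldl_insert ids (fun _ _ => c) PySem.Dict.empty
  rw [this, PySem.Dict.keys_empty, set_update_nil_eq_ofList]

-- ---- A's ban_list loop ----

theorem contains_pairStepA (d : PySem.Dict String (PySem.Set String)) (p : String × String)
    (c : String) : (pairStepA d p).contains c = d.contains c := by
  unfold pairStepA
  by_cases h : d.contains p.2 = true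
  · rw [if_pos h, PySem.Dict.contains_modify]
    by_cases hc : c = p.2
    · subst hc; simp [h]
    · simp [hc]
  · rw [if_neg h]

theorem keys_pairStepA (d : PySem.Dict String (PySem.Set String)) (p : String × String) :
    (pairStepA d p).keys = d.keys := by
  unfold pairStepA
  by_cases h : d.contains p.2 = true
  · rw [if_pos h, PySem.Dict.keys_modify, keys_insert',
      PySem.Set.add_of_mem ((PySem.Dict.contains_iff_mem_keys d p.2).mp h)]
  · rw [if_neg h]

theorem keys_foldA (L : List (String × String)) (d : PySem.Dict String (PySem.Set String)) :
    (L.foldl pairStepA d).keys = d.keys := by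
  induction L generalizing d with
  | nil => rfl
  | cons p L ih => simp only [List.foldl_cons]; rw [ih, keys_pairStepA]

theorem getD_foldA (L : List (String × String)) (d : PySem.Dict String (PySem.Set String))
    (b : String) (hb : d.contains b = true) :
    (L.foldl pairStepA d).getD b PySem.Set.empty =
      PySem.Set.update (d.getD b PySem.Set.empty) ((L.filter (fun p => p.2 == b)).map (·.1)) := by
  induction L generalizing d with
  | nil => simp [PySem.Set.update_nil]
  | cons p L ih =>
      simp only [List.foldl_cons, List.filter_cons]
      by_cases hpb : p.2 = b
      · have hcont : d.contains p.2 = true := by rw [hpb]; exact hb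
        have hstep : pairStepA d p = d.modify p.2 PySem.Set.empty (fun s => PySem.Set.add s p.1) :=
          if_pos hcont
        have hb' : (pairStepA d p).contains b = true := by rw [contains_pairStepA]; exact hb
        rw [ih (pairStepA d p) hb']
        have hget : (pairStepA d p).getD b PySem.Set.empty =
            PySem.Set.add (d.getD b PySem.Set.empty) p.1 := by
          rw [hstep, hpb] at *
          exact PySem.Dict.getD_modify_self d b PySem.Set.empty (fun s => PySem.Set.add s p.1)
        rw [hget]
        simp [hpb]
      · have hff : (p.2 == b) = false := by simp [hpb]
        simp only [hff, Bool.false_eq_true, if_false]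
        have hb' : (pairStepA d p).contains b = true := by rw [contains_pairStepA]; exact hb
        rw [ih (pairStepA d p) hb']
        congr 1
        unfold pairStepA
        by_cases h : d.contains p.2 = true
        · rw [if_pos h]
          exact PySem.Dict.getD_modify_of_ne d PySem.Set.empty _ (fun h' => hpb h'.symm)
        · rw [if_neg h]
  
-- ---- A's second loop (increment per reporter of each banned set) ----

theorem getD_foldAns (k : Int) (items : List (String × PySem.Set String))
    (ans : PySem.Dict String Int) (u : String) :
    ((items.foldl (fun ans iv =>
        if k ≤ PySem.Set.len iv.2 then iv.2.foldl (fun a j => a.modify j 0 (· + 1)) ans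
        else ans) ans).getD u 0) =
      ans.getD u 0 +
        ((items.map (fun iv =>
          if k ≤ PySem.Set.len iv.2 then (iv.2.count u : Int) else 0)).sum) := by
  induction items generalizing ans with
  | nil => simp
  | cons iv items ih =>
      simp only [List.foldl_cons, List.map_cons, List.sum_cons]
      by_cases h : k ≤ PySem.Set.len iv.2
      · rw [if_pos h, if_pos h, ih, PySem.Dict.getD_foldl_modify_add_one]; ring
      · rw [if_neg h, if_neg h, ih]; ring

theorem keys_foldAns (k : Int) (items : List (String × PySem.Set String)) (K : List String)
    (ans : PySem.Dict String Int) (hk : ans.keys = K)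
    (h : ∀ iv ∈ items, k ≤ PySem.Set.len iv.2 → ∀ j ∈ iv.2, j ∈ K) :
    ((items.foldl (fun ans iv =>
        if k ≤ PySem.Set.len iv.2 then iv.2.foldl (fun a j => a.modify j 0 (· + 1)) ans
        else ans) ans).keys) = K := by
  induction items generalizing ans with
  | nil => exact hk
  | cons iv items ih =>
      simp only [List.foldl_cons]
      refine ih _ ?_ (fun iv' h' => h iv' (by simp [h']))
      by_cases hle : k ≤ PySem.Set.len iv.2
      · rw [if_pos hle, PySem.Dict.keys_foldl_modify, hk]
        exact set_update_of_subset K iv.2 (h iv (by simp) hle)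
      · rw [if_neg hle]; exact hk

-- ---- B's counts loop ----

theorem getD_foldC (ids : List String) (l : List (String × String))
    (d : PySem.Dict String Int) (b : String) :
    ((l.foldl (fun d p =>
        if ids.contains p.2 then d.insert p.2 (d.getD p.2 0 + 1) else d) d).getD b 0) =
      d.getD b 0 + ((l.filter (fun p => ids.contains p.2 && p.2 == b)).length : Int) := by
  induction l generalizing d with
  | nil => simp
  | cons p l ih =>
      simp only [List.foldl_cons, List.filter_cons]
      by_cases hin : ids.contains p.2
      · rw [if_pos hin, ih]
        by_cases hpb : p.2 = b
        · have hT : (ids.contains p.2 && (p.2 == b)) = true := by rw [hin, hpb]; simp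
          rw [hT]
          subst hpb
          rw [PySem.Dict.getD_insert_self]
          simp only [if_true]
          push_cast [List.length_cons]; ring
        · have : (ids.contains p.2 && (p.2 == b)) = false := by simp [hpb]
          rw [this]
          simp only [Bool.false_eq_true, if_false]
          rw [PySem.Dict.getD_insert_of_ne d _ 0 (fun h' => hpb h'.symm)]
      · rw [if_neg hin, ih]
        have hF : (ids.contains p.2 && (p.2 == b)) = false := by
          rw [eq_false_of_ne_true hin]; rfl
        rw [hF]
        simp

theorem keys_foldC (ids : List String) (l : List (String × String))
    (d : PySem.Dict String Int) :
    ((l.foldl (fun d p =>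
        if ids.contains p.2 then d.insert p.2 (d.getD p.2 0 + 1) else d) d).keys) =
      PySem.Set.update d.keys ((l.filter (fun p => ids.contains p.2)).map (·.2)) := by
  induction l generalizing d with
  | nil => simp [PySem.Set.update_nil]
  | cons p l ih =>
      simp only [List.foldl_cons, List.filter_cons]
      by_cases hin : ids.contains p.2
      · rw [if_pos hin, if_pos hin, ih, keys_insert']
        rfl
      · rw [if_neg hin]
        simp only [hin, Bool.false_eq_true, if_false]
        exact ih d

-- ---- B's final loop ----

theorem getD_foldAnsB (bs : List String) (l : List (String × String))
    (ans : PySem.Dict String Int) (u : String) :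
    ((l.foldl (fun ans p =>
        if bs.contains p.2 then ans.modify p.1 0 (· + 1) else ans) ans).getD u 0) =
      ans.getD u 0 + ((l.filter (fun p => bs.contains p.2 && p.1 == u)).length : Int) := by
  induction l generalizing ans with
  | nil => simp
  | cons p l ih =>
      simp only [List.foldl_cons, List.filter_cons]
      by_cases hin : bs.contains p.2
      · rw [if_pos hin, ih]
        by_cases hpu : p.1 = u
        · have hT : (bs.contains p.2 && (p.1 == u)) = true := by rw [hin, hpu]; simp
          rw [hT]
          subst hpu
          rw [PySem.Dict.getD_modify_self]
          simp only [if_true]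
          push_cast [List.length_cons]; ring
        · have : (bs.contains p.2 && (p.1 == u)) = false := by simp [hpu]
          rw [this]
          simp only [Bool.false_eq_true, if_false]
          rw [PySem.Dict.getD_modify_of_ne ans 0 _ (fun h' => hpu h'.symm)]
      · rw [if_neg hin, ih]
        have hF : (bs.contains p.2 && (p.1 == u)) = false := by
          rw [eq_false_of_ne_true hin]; rfl
        rw [hF]
        simp

theorem keys_foldAnsB (bs : List String) (l : List (String × String)) (K : List String)
    (ans : PySem.Dict String Int) (hk : ans.keys = K)
    (h : ∀ p ∈ l, bs.contains p.2 = true → p.1 ∈ K) :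
    ((l.foldl (fun ans p =>
        if bs.contains p.2 then ans.modify p.1 0 (· + 1) else ans) ans).keys) = K := by
  induction l generalizing ans with
  | nil => exact hk
  | cons p l ih =>
      simp only [List.foldl_cons]
      refine ih _ ?_ (fun p' h' => h p' (by simp [h']))
      by_cases hin : bs.contains p.2
      · rw [if_pos hin, PySem.Dict.keys_modify, keys_insert', hk]
        exact PySem.Set.add_of_mem (h p (by simp) hin)
      · rw [if_neg hin]; exact hk

-- ---- dedup of pairs commutes with (filter second = b, project first) ----

theorem ofList_append_singleton (L : List (String × String)) (p : String × String) :
    PySem.Set.ofList (L ++ [p]) = PySem.Set.add (PySem.Set.ofList L) p := by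
  simp [PySem.Set.ofList_eq_foldl, List.foldl_append]

theorem ofList_append_singleton' (L : List String) (x : String) :
    PySem.Set.ofList (L ++ [x]) = PySem.Set.add (PySem.Set.ofList L) x := by
  simp [PySem.Set.ofList_eq_foldl, List.foldl_append]

theorem setFilterMap (L : List (String × String)) (b : String) :
    ((PySem.Set.ofList L).filter (fun p => p.2 == b)).map (·.1) =
      PySem.Set.ofList ((L.filter (fun p => p.2 == b)).map (·.1)) := by
  induction L using List.reverseRecOn with
  | nil => rfl
  | append_singleton L p ih =>
      rw [ofList_append_singleton, PySem.Set.add_eq_ite]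
      by_cases hmem : p ∈ PySem.Set.ofList L
      · rw [if_pos hmem, ih]
        by_cases hpb : p.2 = b
        · have hfst : p.1 ∈ (L.filter (fun q => q.2 == b)).map (·.1) := by
            refine List.mem_map.mpr ⟨p, List.mem_filter.mpr ⟨?_, by simp [hpb]⟩, rfl⟩
            exact (PySem.Set.mem_ofList L p).mp hmem
          rw [List.filter_append, List.map_append]
          simp [hpb, ofList_append_singleton',
            PySem.Set.add_of_mem ((PySem.Set.mem_ofList _ _).mpr hfst)]
        · simp [List.filter_append, hpb]
      · rw [if_neg hmem, List.filter_append, List.map_append, List.filter_append, List.map_append]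
        by_cases hpb : p.2 = b
        · have hL : p ∉ L := fun h => hmem ((PySem.Set.mem_ofList L p).mpr h)
          have hfst : p.1 ∉ (L.filter (fun q => q.2 == b)).map (·.1) := by
            intro h
            rcases List.mem_map.mp h with ⟨q, hq, hq1⟩
            rcases List.mem_filter.mp hq with ⟨hqL, hq2⟩
            have : q = p := by
              have h2 : q.2 = p.2 := by rw [hpb]; exact (by simpa using hq2)
              exact Prod.ext hq1 h2
            exact hL (this ▸ hqL)
          simp only [hpb, List.filter_cons]
          simp [ih, ofList_append_singleton',
            PySem.Set.add_of_not_mem (fun h => hfst ((PySem.Set.mem_ofList _ _).mp h))]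
        · simp [hpb, ih]

theorem set_len_eq (s : PySem.Set String) : PySem.Set.len s = (s.length : Int) := by
  simp [PySem.Set.len]

theorem pvReporters_eq (report : List String) (b : String) :
    pvReporters report b = pvRep (pvPairs report) b := by
  unfold pvReporters pvRep
  rw [PySem.List.dedup_eq_ofList]

theorem mem_pvRep (L : List (String × String)) (u b : String) :
    u ∈ pvRep L b ↔ (u, b) ∈ PySem.Set.ofList L := by
  unfold pvRep
  rw [PySem.Set.mem_ofList, PySem.Set.mem_ofList]
  constructor
  · intro h
    rcases List.mem_map.mp h with ⟨q, hq, hq1⟩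
    rcases List.mem_filter.mp hq with ⟨hqL, hq2⟩
    have : q = (u, b) := Prod.ext hq1 (by simpa using hq2)
    exact this ▸ hqL
  · intro h
    exact List.mem_map.mpr ⟨(u, b), List.mem_filter.mpr ⟨h, by simp⟩, rfl⟩

theorem len_filter_eq (ids : List String) (L : List (String × String)) (b : String)
    (hb : b ∈ ids) :
    ((PySem.Set.ofList L).filter (fun p => ids.contains p.2 && p.2 == b)).length =
      (pvRep L b).length := by
  have hcongr : (PySem.Set.ofList L).filter (fun p => ids.contains p.2 && p.2 == b) =
      (PySem.Set.ofList L).filter (fun p => p.2 == b) := by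
    refine List.filter_congr (fun p _ => ?_)
    by_cases hpb : p.2 = b
    · subst hpb; simp [hb]
    · simp [hpb]
  rw [hcongr]
  unfold pvRep
  rw [← setFilterMap, List.length_map]

-- B's counts dict and banned list, named for the proofs
def pvCounts (id_list report : List String) : PySem.Dict String Int :=
  (PySem.Set.ofList (pvPairs report)).foldl
    (fun d p => if id_list.contains p.2 then d.insert p.2 (d.getD p.2 0 + 1) else d)
    PySem.Dict.empty

def pvBanned (id_list report : List String) (k : Int) : List String :=
  ((pvCounts id_list report).items.filter (fun q => k ≤ q.2)).map (·.1)

theorem keys_pvCounts (id_list report : List String) :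
    (pvCounts id_list report).keys =
      PySem.Set.ofList (((PySem.Set.ofList (pvPairs report)).filter
        (fun p => id_list.contains p.2)).map (·.2)) := by
  unfold pvCounts
  rw [keys_foldC, PySem.Dict.keys_empty, set_update_nil_eq_ofList]

theorem nodup_keys_pvCounts (id_list report : List String) :
    (pvCounts id_list report).keys.Nodup := by
  rw [keys_pvCounts]; exact PySem.Set.nodup_ofList _

theorem mem_keys_pvCounts (id_list report : List String) (b : String) :
    b ∈ (pvCounts id_list report).keys ↔
      (b ∈ id_list ∧ ∃ a, (a, b) ∈ PySem.Set.ofList (pvPairs report)) := by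
  rw [keys_pvCounts, PySem.Set.mem_ofList]
  constructor
  · intro h
    rcases List.mem_map.mp h with ⟨q, hq, hq2⟩
    rcases List.mem_filter.mp hq with ⟨hqP, hqc⟩
    refine ⟨?_, ⟨q.1, ?_⟩⟩
    · subst hq2; simpa using hqc
    · have : q = (q.1, b) := Prod.ext rfl hq2
      exact this ▸ hqP
  · rintro ⟨hb, a, ha⟩
    exact List.mem_map.mpr ⟨(a, b), List.mem_filter.mpr ⟨ha, by simpa using hb⟩, rfl⟩

theorem getD_pvCounts (id_list report : List String) (b : String) (hb : b ∈ id_list) :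
    (pvCounts id_list report).getD b 0 = ((pvRep (pvPairs report) b).length : Int) := by
  unfold pvCounts
  rw [getD_foldC, PySem.Dict.getD_empty, len_filter_eq id_list _ b hb]
  ring

theorem mem_pvBanned (id_list report : List String) (k : Int) (b : String) :
    b ∈ pvBanned id_list report k ↔
      (b ∈ id_list ∧ (∃ a, (a, b) ∈ PySem.Set.ofList (pvPairs report)) ∧
        k ≤ ((pvRep (pvPairs report) b).length : Int)) := by
  unfold pvBanned
  rw [PySem.Dict.items_eq_map_keys _ (nodup_keys_pvCounts id_list report) 0,
    List.filter_map, List.map_map]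
  have hcomp : ((·.1) ∘ fun b => (b, (pvCounts id_list report).getD b 0)) = fun b : String => b :=
    rfl
  rw [hcomp, List.map_id'' (fun _ => rfl)]
  rw [List.mem_filter]
  constructor
  · rintro ⟨hk, hdec⟩
    rcases (mem_keys_pvCounts id_list report b).mp hk with ⟨hb, ha⟩
    refine ⟨hb, ha, ?_⟩
    have := of_decide_eq_true (by simpa using hdec)
    rwa [getD_pvCounts id_list report b hb] at this
  · rintro ⟨hb, ha, hlen⟩
    refine ⟨(mem_keys_pvCounts id_list report b).mpr ⟨hb, ha⟩, ?_⟩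
    have : (pvCounts id_list report).getD b 0 = ((pvRep (pvPairs report) b).length : Int) :=
      getD_pvCounts id_list report b hb
    simp [this, hlen]

theorem solutionA_values (id_list report : List String) (k : Int)
    (hpre : Pre_solution id_list report k) :
    solution id_list report k = (PySem.Set.ofList id_list).map (fun u =>
      ((PySem.Set.ofList id_list).map (fun b =>
        if k ≤ PySem.Set.len (pvRep (pvPairs report) b) then
          ((pvRep (pvPairs report) b).count u : Int) else 0)).sum) := by
  obtain ⟨h2, hkey⟩ := hpre
  have nodupK : (PySem.Set.ofList id_list).Nodup := PySem.Set.nodup_ofList id_list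
  simp only [solution]
  rw [foldA_eq_pairs]
  have hKban0 : (id_list.foldl
      (fun (d : PySem.Dict String (PySem.Set String)) a => d.insert a PySem.Set.empty)
      PySem.Dict.empty).keys = PySem.Set.ofList id_list :=
    keys_foldl_insert_const id_list PySem.Set.empty
  set ban0 : PySem.Dict String (PySem.Set String) :=
    id_list.foldl (fun d a => d.insert a PySem.Set.empty) PySem.Dict.empty with hban0
  set ban := (pvPairs report).foldl pairStepA ban0 with hban
  have hKban : ban.keys = PySem.Set.ofList id_list := by
    rw [hban, keys_foldA, hKban0]
  have hcontb : ∀ b ∈ PySem.Set.ofList id_list, ban0.contains b = true := fun b hb =>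
    (PySem.Dict.contains_iff_mem_keys _ _).mpr (hKban0 ▸ hb)
  have hbget : ∀ b ∈ PySem.Set.ofList id_list,
      ban.getD b PySem.Set.empty = pvRep (pvPairs report) b := by
    intro b hb
    rw [hban, getD_foldA _ ban0 b (hcontb b hb)]
    have h0 : ban0.getD b PySem.Set.empty = PySem.Set.empty :=
      getD_foldl_insert_const id_list PySem.Dict.empty PySem.Set.empty b
        (PySem.Dict.getD_empty b _)
    rw [h0]
    exact set_update_nil_eq_ofList _
  have hitems : ban.items =
      (PySem.Set.ofList id_list).map (fun b => (b, pvRep (pvPairs report) b)) := by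
    rw [PySem.Dict.items_eq_map_keys ban (hKban ▸ nodupK) PySem.Set.empty, hKban]
    exact List.map_congr_left (fun b hb => by rw [hbget b hb])
  have hansK : (id_list.foldl (fun d a => d.insert a (0 : Int))
      PySem.Dict.empty).keys = PySem.Set.ofList id_list := keys_foldl_insert_const id_list 0
  set ans0 : PySem.Dict String Int :=
    id_list.foldl (fun d a => d.insert a 0) PySem.Dict.empty with hans0
  have hsub : ∀ iv ∈ ban.items, k ≤ PySem.Set.len iv.2 →
      ∀ j ∈ iv.2, j ∈ PySem.Set.ofList id_list := by
    rw [hitems]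
    intro iv hiv hlen j hj
    rcases List.mem_map.mp hiv with ⟨b, hbK, rfl⟩
    have hjb : (j, b) ∈ PySem.Set.ofList (pvPairs report) :=
      (mem_pvRep (pvPairs report) j b).mp hj
    have hjL : (j, b) ∈ pvPairs report := (PySem.Set.mem_ofList _ _).mp hjb
    have hbid : b ∈ id_list := (PySem.Set.mem_ofList id_list b).mp hbK
    have hlen' : k ≤ ((pvReporters report b).length : Int) := by
      rw [pvReporters_eq]
      rw [set_len_eq] at hlen
      exact hlen
    exact (PySem.Set.mem_ofList id_list j).mpr (hkey (j, b) hjL hbid hlen')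
  set fin := ban.items.foldl (fun ans iv =>
      if k ≤ PySem.Set.len iv.2 then iv.2.foldl (fun a j => a.modify j 0 (· + 1)) ans
      else ans) ans0 with hfin
  have hkeysFin : fin.keys = PySem.Set.ofList id_list :=
    keys_foldAns k ban.items _ ans0 hansK hsub
  rw [PySem.Dict.values_eq_map_keys fin (hkeysFin ▸ nodupK) 0, hkeysFin]
  refine List.map_congr_left (fun u _ => ?_)
  rw [hfin, getD_foldAns]
  have h00 : ans0.getD u 0 = 0 :=
    getD_foldl_insert_const id_list PySem.Dict.empty 0 u (PySem.Dict.getD_empty u 0)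
  rw [h00, hitems, List.map_map]
  simp [Function.comp_def]
  rfl

theorem solutionB_values (id_list report : List String) (k : Int)
    (hpre : Pre_solution id_list report k) :
    solution_alt id_list report k = (PySem.Set.ofList id_list).map (fun u =>
      (((PySem.Set.ofList (pvPairs report)).filter
        (fun p => (pvBanned id_list report k).contains p.2 && p.1 == u)).length : Int)) := by
  obtain ⟨h2, hkey⟩ := hpre
  have nodupK : (PySem.Set.ofList id_list).Nodup := PySem.Set.nodup_ofList id_list
  simp only [solution_alt]
  rw [foldB_eq_pairs]
  have hP : (pvPairs report).foldl PySem.Set.add PySem.Set.empty =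
      PySem.Set.ofList (pvPairs report) := (PySem.Set.ofList_eq_foldl _).symm
  rw [hP]
  have hc : (PySem.Set.ofList (pvPairs report)).foldl
      (fun d p => if id_list.contains p.2 then d.insert p.2 (d.getD p.2 0 + 1) else d)
      PySem.Dict.empty = pvCounts id_list report := rfl
  rw [hc]
  have hbn : ((pvCounts id_list report).items.filter (fun q => k ≤ q.2)).map (·.1) =
      pvBanned id_list report k := rfl
  rw [hbn]
  have hansK : (id_list.foldl (fun d u => d.insert u (0 : Int))
      PySem.Dict.empty).keys = PySem.Set.ofList id_list := keys_foldl_insert_const id_list 0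
  set ans0 : PySem.Dict String Int :=
    id_list.foldl (fun d u => d.insert u 0) PySem.Dict.empty with hans0
  have hsub : ∀ p ∈ PySem.Set.ofList (pvPairs report),
      (pvBanned id_list report k).contains p.2 = true → p.1 ∈ PySem.Set.ofList id_list := by
    intro p hp hcont
    have hmem : p.2 ∈ pvBanned id_list report k := by simpa using hcont
    rcases (mem_pvBanned id_list report k p.2).mp hmem with ⟨hbid, _, hlen⟩
    have hpL : p ∈ pvPairs report := (PySem.Set.mem_ofList _ _).mp hp
    have hlen' : k ≤ ((pvReporters report p.2).length : Int) := by
      rw [pvReporters_eq]; exact hlen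
    exact (PySem.Set.mem_ofList id_list p.1).mpr (hkey p hpL hbid hlen')
  set fin := (PySem.Set.ofList (pvPairs report)).foldl (fun ans p =>
      if (pvBanned id_list report k).contains p.2 then ans.modify p.1 0 (· + 1) else ans)
      ans0 with hfin
  have hkeysFin : fin.keys = PySem.Set.ofList id_list :=
    keys_foldAnsB (pvBanned id_list report k) _ _ ans0 hansK hsub
  rw [PySem.Dict.values_eq_map_keys fin (hkeysFin ▸ nodupK) 0, hkeysFin]
  refine List.map_congr_left (fun u _ => ?_)
  rw [hfin, getD_foldAnsB]
  have h00 : ans0.getD u 0 = 0 :=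
    getD_foldl_insert_const id_list PySem.Dict.empty 0 u (PySem.Dict.getD_empty u 0)
  rw [h00]
  ring

theorem countP_eq_card {α : Type} [DecidableEq α] (l : List α) (p : α → Bool)
    (h : l.Nodup) : l.countP p = (l.toFinset.filter (fun x => p x = true)).card := by
  rw [List.countP_eq_length_filter, ← List.toFinset_card_of_nodup (List.Nodup.filter p h),
    List.toFinset_filter]

theorem per_u (id_list report : List String) (k : Int) (u : String) :
    ((PySem.Set.ofList id_list).map (fun b =>
      if k ≤ PySem.Set.len (pvRep (pvPairs report) b) then
        ((pvRep (pvPairs report) b).count u : Int) else 0)).sum =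
    (((PySem.Set.ofList (pvPairs report)).filter
      (fun p => (pvBanned id_list report k).contains p.2 && p.1 == u)).length : Int) := by
  have hstep : ∀ b ∈ PySem.Set.ofList id_list,
      (if k ≤ PySem.Set.len (pvRep (pvPairs report) b) then
        ((pvRep (pvPairs report) b).count u : Int) else 0) =
      (if (decide (k ≤ ((pvRep (pvPairs report) b).length : Int)) &&
           decide ((u, b) ∈ PySem.Set.ofList (pvPairs report))) = true then (1 : Int) else 0) := by
    intro b _
    by_cases hu : u ∈ pvRep (pvPairs report) b
    · have h1 : (pvRep (pvPairs report) b).count u = 1 :=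
        List.count_eq_one_of_mem (PySem.Set.nodup_ofList _) hu
      have hub : (u, b) ∈ PySem.Set.ofList (pvPairs report) := (mem_pvRep _ u b).mp hu
      by_cases hk : k ≤ ((pvRep (pvPairs report) b).length : Int)
      · simp [hk, h1, hub]
      · simp [hk, hub]
    · have h0 : (pvRep (pvPairs report) b).count u = 0 := List.count_eq_zero_of_not_mem hu
      have hub : ¬((u, b) ∈ PySem.Set.ofList (pvPairs report)) :=
        fun h => hu ((mem_pvRep _ u b).mpr h)
      simp [h0, hub]
  rw [List.map_congr_left hstep, PySem.List.sum_map_ite_one_zero, ← List.countP_eq_length_filter]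
  norm_cast
  rw [countP_eq_card _ _ (PySem.Set.nodup_ofList id_list),
    countP_eq_card _ _ (PySem.Set.nodup_ofList (pvPairs report))]
  refine Finset.card_bij (fun b _ => ((u, b) : String × String)) ?_ ?_ ?_
  · intro b hb
    rcases Finset.mem_filter.mp hb with ⟨hbK, hQA⟩
    rcases Bool.and_eq_true_iff.mp hQA with ⟨hk', hub'⟩
    have hk2 : k ≤ ((pvRep (pvPairs report) b).length : Int) := of_decide_eq_true hk'
    have hub : (u, b) ∈ PySem.Set.ofList (pvPairs report) := of_decide_eq_true hub'
    have hbid : b ∈ id_list :=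
      (PySem.Set.mem_ofList id_list b).mp (List.mem_toFinset.mp hbK)
    have hban : b ∈ pvBanned id_list report k :=
      (mem_pvBanned id_list report k b).mpr ⟨hbid, ⟨u, hub⟩, hk2⟩
    refine Finset.mem_filter.mpr ⟨List.mem_toFinset.mpr hub, ?_⟩
    simp [hban]
  · intro b1 _ b2 _ e
    exact congrArg Prod.snd e
  · intro p hp
    rcases Finset.mem_filter.mp hp with ⟨hpP, hQB⟩
    rcases Bool.and_eq_true_iff.mp hQB with ⟨hcont, hfst⟩
    have hp1 : p.1 = u := by simpa using hfst
    have hpP' : p ∈ PySem.Set.ofList (pvPairs report) := List.mem_toFinset.mp hpP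
    have hban : p.2 ∈ pvBanned id_list report k := by simpa using hcont
    rcases (mem_pvBanned id_list report k p.2).mp hban with ⟨hbid, _, hlen⟩
    have hup : (u, p.2) = p := Prod.ext hp1.symm rfl
    refine ⟨p.2, Finset.mem_filter.mpr ⟨List.mem_toFinset.mpr
      ((PySem.Set.mem_ofList id_list p.2).mpr hbid), ?_⟩, hup⟩
    have hub : (u, p.2) ∈ PySem.Set.ofList (pvPairs report) := hup ▸ hpP'
    simp [hlen, hub]

-- ===== VERDICT (by name: the statement is the Claim_ definition above) =====
theorem solution_spec : Claim_equal_solution := by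
  intro id_list report k _ hpre
  unfold Spec_solution
  rw [solutionA_values id_list report k hpre, solutionB_values id_list report k hpre]
  exact List.map_congr_left (fun u _ => per_u id_list report k u)
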